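-- pv_equiv track=rewrite | github.com/rehmanul/-Legislative-Intelligence-Platform | scripts/check_comm_evt_readiness.py | check_artifact_approvals
-- ===== SOURCE A (Python) =====
-- from typing import Dict, List, Any, Tuple
--
-- def check_artifact_approvals(hr_pre_queue: Dict[str, Any]) -> Tuple[bool, List[str], List[str]]:
--     """Check if required artifacts are approved"""
--     required_artifacts = ["INTRO_FRAME", "INTRO_WHITEPAPER"]
--     approved = []
--     missing = []
--
--     review_history = hr_pre_queue.get("review_history", [])
--
--     for artifact_type in required_artifacts:
--         found_approved = False
--         for review in review_history:
--             if review.get("artifact_type") == artifact_type and review.get("decision") == "APPROVED":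
--                 approved.append(f"{artifact_type} (approved by {review.get('decision_by', 'unknown')} at {review.get('decision_at', 'unknown')})")
--                 found_approved = True
--                 break
--
--         if not found_approved:
--             missing.append(f"{artifact_type} (not approved)")
--
--     all_approved = len(missing) == 0
--     return all_approved, approved, missing
-- ===== SOURCE B (Python) =====
-- def check_artifact_approvals(hr_pre_queue):
--     """Check if required artifacts are approved (single pass over review_history)."""
--     required_artifacts = ["INTRO_FRAME", "INTRO_WHITEPAPER"]
--     idx = {}
--     for review in hr_pre_queue.get("review_history", []):
--         if review.get("decision") == "APPROVED":
--             idx.setdefault(review.get("artifact_type"), review)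
--     approved = [
--         f"{t} (approved by {idx[t].get('decision_by', 'unknown')} at {idx[t].get('decision_at', 'unknown')})"
--         for t in required_artifacts if t in idx
--     ]
--     missing = [f"{t} (not approved)" for t in required_artifacts if t not in idx]
--     return not missing, approved, missing
-- ===== Notes on version B (the rewrite author's own statement) =====
-- stated objective: simpler
-- what changed: B scans review_history once, indexing the first APPROVED review per artifact_type with setdefault, then builds the approved/missing lists by comprehensions over the required list instead of A's nested rescans of the history.
import Mathlib
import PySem

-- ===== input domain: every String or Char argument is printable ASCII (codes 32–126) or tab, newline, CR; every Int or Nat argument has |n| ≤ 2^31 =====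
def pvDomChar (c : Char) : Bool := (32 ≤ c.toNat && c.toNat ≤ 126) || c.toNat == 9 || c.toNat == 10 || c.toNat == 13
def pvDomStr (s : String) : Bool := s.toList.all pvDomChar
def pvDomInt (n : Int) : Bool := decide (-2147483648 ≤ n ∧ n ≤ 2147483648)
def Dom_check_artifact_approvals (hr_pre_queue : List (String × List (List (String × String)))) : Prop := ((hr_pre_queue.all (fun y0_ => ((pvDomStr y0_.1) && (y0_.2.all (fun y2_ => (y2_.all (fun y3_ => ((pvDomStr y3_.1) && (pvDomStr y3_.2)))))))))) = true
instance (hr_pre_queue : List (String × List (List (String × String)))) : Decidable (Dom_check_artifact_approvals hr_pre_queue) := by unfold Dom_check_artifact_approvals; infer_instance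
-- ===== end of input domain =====

-- B replaces A's rescan of review_history per required artifact by one indexing pass
-- (first APPROVED review per type) plus comprehensions over the required list; simpler/one pass.

-- shared primitive: Python dict.get on an association list (first match)
def pvGet (r : List (String × String)) (k : String) : Option String :=
  (r.find? (fun p => p.1 == k)).map (·.2)

-- shared pure formatting of the f-string (identical in both Pythons)
def fmtApproved (t : String) (r : List (String × String)) : String :=
  t ++ " (approved by " ++ ((pvGet r "decision_by").getD "unknown") ++ " at " ++
    ((pvGet r "decision_at").getD "unknown") ++ ")"

-- ===== PORT A =====
-- A's inner `for review … break`: first review of the given type with decision APPROVED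
def pvFindApproved (t : String) : List (List (String × String)) → Option (List (String × String))
  | [] => none
  | r :: rest =>
      if (pvGet r "artifact_type" == some t && pvGet r "decision" == some "APPROVED") then some r
      else pvFindApproved t rest

def check_artifact_approvals (hr_pre_queue : List (String × List (List (String × String)))) : Bool × List String × List String :=
  let review_history := ((hr_pre_queue.find? (fun p => p.1 == "review_history")).map (·.2)).getD []
  let res := ["INTRO_FRAME", "INTRO_WHITEPAPER"].foldl
    (fun (acc : List String × List String) t =>
      match pvFindApproved t review_history with
      | some r => (acc.1 ++ [fmtApproved t r], acc.2)
      | none => (acc.1, acc.2 ++ [t ++ " (not approved)"]))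
    ([], [])
  (res.2.length == 0, res.1, res.2)

-- ===== PORT B =====
-- B's indexing pass: dict mapping artifact_type (a .get result, possibly None) to the
-- first APPROVED review of that type (setdefault: earlier approvals win)
def pvApprovedIndex (rs : List (List (String × String))) : PySem.Dict (Option String) (List (String × String)) :=
  rs.foldl
    (fun d r => if pvGet r "decision" == some "APPROVED" then d.setdefault (pvGet r "artifact_type") r else d)
    PySem.Dict.empty

def check_artifact_approvals_alt (hr_pre_queue : List (String × List (List (String × String)))) : Bool × List String × List String :=
  let idx := pvApprovedIndex (((hr_pre_queue.find? (fun p => p.1 == "review_history")).map (·.2)).getD [])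
  -- comprehension `[… for t in required if t in idx]` with an idx[t] lookup: filterMap
  let approved := ["INTRO_FRAME", "INTRO_WHITEPAPER"].filterMap
    (fun t => (idx.get? (some t)).map (fun r => fmtApproved t r))
  let missing := (["INTRO_FRAME", "INTRO_WHITEPAPER"].filter (fun t => ! idx.contains (some t))).map
    (fun t => t ++ " (not approved)")
  (missing.isEmpty, approved, missing)

-- ===== PRECONDITION & SPEC =====
def Spec_check_artifact_approvals (hr_pre_queue : List (String × List (List (String × String)))) (out : Bool × List String × List String) : Prop := out = check_artifact_approvals_alt hr_pre_queue
instance (hr_pre_queue : List (String × List (List (String × String)))) (out : Bool × List String × List String) : Decidable (Spec_check_artifact_approvals hr_pre_queue out) := by unfold Spec_check_artifact_approvals; infer_instance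

-- ===== CLAIM (what is proved, stated in full; the proofs are below) =====
def Claim_equal_check_artifact_approvals : Prop := ∀ (hr_pre_queue : List (String × List (List (String × String)))), Dom_check_artifact_approvals hr_pre_queue → Spec_check_artifact_approvals hr_pre_queue (check_artifact_approvals hr_pre_queue)

-- ===== LEMMAS AND PROOFS =====

-- the setdefault-index lookup is exactly A's first-match scan
theorem approvedIndex_get (rs : List (List (String × String)))
    (d : PySem.Dict (Option String) (List (String × String))) (t : String) :
    (rs.foldl
      (fun d r => if pvGet r "decision" == some "APPROVED" then d.setdefault (pvGet r "artifact_type") r else d)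
      d).get? (some t) = (d.get? (some t)).or (pvFindApproved t rs) := by
  induction rs generalizing d with
  | nil => simp [pvFindApproved]
  | cons r rest ih =>
    simp only [List.foldl_cons]
    by_cases hdec : (pvGet r "decision" == some "APPROVED") = true
    · rw [if_pos hdec, ih]
      by_cases hkey : pvGet r "artifact_type" = some t
      · have he : pvFindApproved t (r :: rest) = some r := by
          simp [pvFindApproved, hkey, hdec]
        rw [he, hkey, PySem.Dict.get?_setdefault_self]
        cases h : d.get? (some t) <;> simp
      · have hb : (pvGet r "artifact_type" == some t) = false := by simp [hkey]
        have he : pvFindApproved t (r :: rest) = pvFindApproved t rest := by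
          simp [pvFindApproved, hb]
        rw [he, PySem.Dict.get?_setdefault_of_ne _ _ (fun h => hkey h.symm)]
    · have hb : (pvGet r "decision" == some "APPROVED") = false := by simpa using hdec
      have he : pvFindApproved t (r :: rest) = pvFindApproved t rest := by
        simp [pvFindApproved, hb]
      rw [if_neg hdec, ih, he]

theorem check_artifact_approvals_spec : Claim_equal_check_artifact_approvals := by
  intro q _
  unfold Spec_check_artifact_approvals check_artifact_approvals check_artifact_approvals_alt
  set rh := ((q.find? (fun p => p.1 == "review_history")).map (·.2)).getD [] with hrh
  have hget : ∀ t, (pvApprovedIndex rh).get? (some t) = pvFindApproved t rh := by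
    intro t
    rw [pvApprovedIndex, approvedIndex_get]
    simp
  have hcont : ∀ t, (pvApprovedIndex rh).contains (some t) = (pvFindApproved t rh).isSome := by
    intro t
    rw [PySem.Dict.contains_eq_isSome_get?, hget]
  simp only [hget, hcont]
  cases h1 : pvFindApproved "INTRO_FRAME" rh <;>
    cases h2 : pvFindApproved "INTRO_WHITEPAPER" rh <;>
      simp [List.foldl, List.filterMap, List.filter, h1, h2]
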